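-- pv_equiv track=rewrite | github.com/larrylai19/LeetCode | Python/0821.py | shortestToChar
-- ===== SOURCE A (Python) =====
-- from typing import List
--
-- def shortestToChar(s: str, c: str) -> List[int]:
--     l = []
--     for i, ch in enumerate(s):
--         if ch == c:
--             l.append(0)
--             continue
--         lth = float('inf')
--         le, r = i - 1, i + 1
--         while le >= 0:
--             if s[le] == c:
--                 lth = min(lth, i - le)
--                 break
--             le -= 1
--         while r < len(s):
--             if s[r] == c:
--                 lth = min(lth, r - i)
--                 break
--             r += 1
--         l.append(lth)
--     return l
-- ===== SOURCE B (Python) =====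
-- def shortestToChar(s: str, c: str):
--     # Two linear passes with -inf/+inf sentinels: left-to-right tracking the
--     # last c seen, right-to-left tracking the next c. O(n) instead of A's
--     # per-index rescans.
--     n = len(s)
--     prev = float('-inf')
--     ans = []
--     for i, x in enumerate(s):
--         if x == c:
--             prev = i
--         ans.append(i - prev)
--     prev = float('inf')
--     for i in range(n - 1, -1, -1):
--         if s[i] == c:
--             prev = i
--         ans[i] = min(ans[i], prev - i)
--     return ans
-- ===== Notes on version B (the rewrite author's own statement) =====
-- stated objective: faster
-- what changed: Replaces A's per-index outward scans (left and right from every position) by two linear passes tracking the last/next occurrence of c with -inf/+inf sentinels, turning O(n^2) into O(n).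
import Mathlib
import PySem

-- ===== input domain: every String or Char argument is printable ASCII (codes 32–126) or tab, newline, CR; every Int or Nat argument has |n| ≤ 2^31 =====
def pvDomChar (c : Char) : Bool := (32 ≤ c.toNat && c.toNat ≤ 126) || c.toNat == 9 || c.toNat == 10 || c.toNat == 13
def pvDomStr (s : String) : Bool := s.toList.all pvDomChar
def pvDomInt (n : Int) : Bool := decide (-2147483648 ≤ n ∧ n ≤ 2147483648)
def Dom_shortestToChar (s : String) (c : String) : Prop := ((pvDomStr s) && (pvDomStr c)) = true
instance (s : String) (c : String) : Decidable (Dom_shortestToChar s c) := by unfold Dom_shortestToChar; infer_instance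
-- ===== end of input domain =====

-- B replaces A's per-index outward scans by two linear passes with -inf/+inf
-- sentinels (last / next occurrence of c); proved to return the same list
-- whenever c occurs in s (or s is empty); outside that both Pythons return
-- float('inf') entries, not ints, which Pre_ excludes.


-- ===== PORT A =====
-- A's inner `while le >= 0` loop: scan indices le, le-1, …, 0 for the first match.
def pvScanL (cs : List Char) (c : String) : Nat → Option Nat
  | 0 => if c.toList = [cs.getD 0 ' '] then some 0 else none
  | le + 1 => if c.toList = [cs.getD (le + 1) ' '] then some (le + 1) else pvScanL cs c le

-- `le = i-1; while le >= 0: …` — no iteration when i = 0, else scan from i-1 down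
def pvLeftOpt (cs : List Char) (c : String) (i : Nat) : Option Nat :=
  match i with | 0 => none | i' + 1 => pvScanL cs c i'

-- A's inner `while r < len(s)` loop: scan indices r, r+1, … for the first match.
def pvScanR (cs : List Char) (c : String) (r : Nat) : Option Nat :=
  if r < cs.length then
    if c.toList = [cs.getD r ' '] then some r else pvScanR cs c (r + 1)
  else none
termination_by cs.length - r

-- Under Pre_ at least one scan succeeds, so the `none, none` arm (Python's
-- residual float('inf')) is unreachable; it carries the sentinel n+1.
def shortestToChar (s : String) (c : String) : List Int :=
  let cs := s.toList
  (List.range cs.length).map (fun i =>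
    if c.toList = [cs.getD i ' '] then (0 : Int)
    else
      let lft : Option Nat := pvLeftOpt cs c i
      let rgt : Option Nat := pvScanR cs c (i + 1)
      match lft, rgt with
      | some le, some r => min ((i : Int) - le) ((r : Int) - i)
      | some le, none   => (i : Int) - le
      | none,    some r => (r : Int) - i
      | none,    none   => (cs.length : Int) + 1)

-- ===== PORT B =====
-- B's first pass: left to right; Python's prev = float('-inf') sentinel is
-- rendered as `none` (so `i - prev = inf` is the sentinel n; exact on Pre_,
-- where every surviving entry is an int).
def pvGoL (c : String) (n : Int) : List Char → Nat → Option Nat → List Int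
  | [], _, _ => []
  | ch :: rest, i, prev =>
    let prev' := if c.toList = [ch] then some i else prev
    (match prev' with | some p => (i : Int) - p | none => n) :: pvGoL c n rest (i + 1) prev'

-- B's second pass (Python's reversed index loop, rendered as structural
-- recursion from the right); prev = float('inf') rendered as `none`
-- (min with +inf keeps the other argument).
def pvGoR (c : String) : Nat → List Char → List Int → List Int × Option Nat
  | _, [], _ => ([], none)
  | i, ch :: rest, r :: rs =>
      let (rs', prev) := pvGoR c (i + 1) rest rs
      let prev' := if c.toList = [ch] then some i else prev
      ((match prev' with | some p => min r ((p : Int) - i) | none => r) :: rs', prev')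
  | _, _ :: _, [] => ([], none)

def shortestToChar_alt (s : String) (c : String) : List Int :=
  let cs := s.toList
  let res := pvGoL c (cs.length : Int) cs 0 none
  (pvGoR c 0 cs res).1

-- ===== PRECONDITION & SPEC =====
-- Pre_ excludes inputs where c (as a one-character string) never occurs in a
-- nonempty s: there Python A returns float('inf') entries, not ints.
def Pre_shortestToChar (s : String) (c : String) : Prop :=
  s.toList = [] ∨ c.toList ∈ s.toList.map (fun ch => [ch])
instance (s : String) (c : String) : Decidable (Pre_shortestToChar s c) := by
  unfold Pre_shortestToChar; infer_instance
def pvWitness_shortestToChar : String × String := ("aba", "b")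

def Spec_shortestToChar (s : String) (c : String) (out : List Int) : Prop := out = shortestToChar_alt s c
instance (s : String) (c : String) (out : List Int) : Decidable (Spec_shortestToChar s c out) := by unfold Spec_shortestToChar; infer_instance

-- ===== CLAIM (what is proved, stated in full; the proofs are below) =====
def Claim_equal_shortestToChar : Prop := ∀ (s : String) (c : String), Dom_shortestToChar s c → Pre_shortestToChar s c → Spec_shortestToChar s c (shortestToChar s c)

-- ===== LEMMAS AND PROOFS =====

lemma pvScanL_none (cs : List Char) (c : String) (le : Nat)
    (h : pvScanL cs c le = none) : ∀ k ≤ le, ¬ c.toList = [cs.getD k ' '] := by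
  induction le with
  | zero =>
    intro k hk
    interval_cases k
    intro hc
    rw [pvScanL, if_pos hc] at h
    cases h
  | succ n ih =>
    intro k hk
    by_cases hc : c.toList = [cs.getD (n + 1) ' ']
    · rw [pvScanL, if_pos hc] at h; cases h
    · rw [pvScanL, if_neg hc] at h
      rcases Nat.lt_or_ge k (n + 1) with h1 | h1
      · exact ih h k (by omega)
      · have : k = n + 1 := by omega
        simpa [this] using hc

lemma pvScanR_none (cs : List Char) (c : String) :
    ∀ K r, cs.length - r = K → pvScanR cs c r = none →
      ∀ k, r ≤ k → k < cs.length → ¬ c.toList = [cs.getD k ' '] := by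
  intro K
  induction K with
  | zero =>
    intro r hK _ k hk1 hk2
    omega
  | succ m ih =>
    intro r hK h k hk1 hk2
    have hr : r < cs.length := by omega
    rw [pvScanR, if_pos hr] at h
    by_cases hc : c.toList = [cs.getD r ' ']
    · rw [if_pos hc] at h; cases h
    · rw [if_neg hc] at h
      rcases Nat.lt_or_ge r k with h1 | h1
      · exact ih (r + 1) (by omega) h k (by omega) hk2
      · have : k = r := by omega
        simpa [this] using hc

lemma pvScanR_lt (cs : List Char) (c : String) :
    ∀ K r j, cs.length - r = K → pvScanR cs c r = some j → j < cs.length := by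
  intro K
  induction K with
  | zero =>
    intro r j hK h
    rw [pvScanR, if_neg (by omega)] at h
    cases h
  | succ m ih =>
    intro r j hK h
    have hr : r < cs.length := by omega
    rw [pvScanR, if_pos hr] at h
    by_cases hc : c.toList = [cs.getD r ' ']
    · rw [if_pos hc] at h; cases h; exact hr
    · rw [if_neg hc] at h
      exact ih (r + 1) j (by omega) h

lemma pvScanL_unfold (cs : List Char) (c : String) (i : Nat) :
    pvScanL cs c i =
      if c.toList = [cs.getD i ' '] then some i else pvLeftOpt cs c i := by
  cases i with
  | zero => simp [pvScanL, pvLeftOpt]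
  | succ n => simp [pvScanL, pvLeftOpt]

lemma pvScanR_unfold (cs : List Char) (c : String) (i : Nat) (hi : i < cs.length) :
    pvScanR cs c i =
      if c.toList = [cs.getD i ' '] then some i else pvScanR cs c (i + 1) := by
  rw [pvScanR, if_pos hi]

-- the first pass computes, at each index j, the distance to the nearest match
-- at or to the left (or the sentinel n when there is none)
lemma pvGoL_eq (cs : List Char) (c : String) (n : Int) :
    ∀ k i prev, cs.length - i = k → prev = pvLeftOpt cs c i →
    pvGoL c n (cs.drop i) i prev =
      (List.range' i (cs.length - i)).map (fun j =>
        match pvScanL cs c j with | some p => (j : Int) - p | none => n) := by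
  intro k
  induction k with
  | zero =>
    intro i prev hk _
    have h1 : cs.drop i = [] := List.drop_eq_nil_of_le (by omega)
    rw [h1, hk]
    rfl
  | succ m ih =>
    intro i prev hk hprev
    subst hprev
    have hi : i < cs.length := by omega
    have hdrop : cs.drop i = cs[i] :: cs.drop (i + 1) := List.drop_eq_getElem_cons hi
    have hgd : cs.getD i ' ' = cs[i] := List.getD_eq_getElem cs ' ' hi
    have hrange : List.range' i (cs.length - i) = i :: List.range' (i + 1) (cs.length - (i + 1)) := by
      have : cs.length - i = (cs.length - (i + 1)) + 1 := by omega
      rw [this, List.range'_succ]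
    have hprev' : (if c.toList = [cs[i]] then some i else pvLeftOpt cs c i) = pvScanL cs c i := by
      rw [pvScanL_unfold, hgd]
    have hnext : pvScanL cs c i = pvLeftOpt cs c (i + 1) := rfl
    rw [hdrop, hrange, List.map_cons]
    simp only [pvGoL, hprev']
    exact congrArg _ (ih (i + 1) (pvScanL cs c i) (by omega) hnext.symm)

-- the second pass refines each entry with the distance to the nearest match
-- at or to the right, and returns the index of the nearest match at or after i
lemma pvGoR_eq (cs : List Char) (c : String) (g : Nat → Int) :
    ∀ k i, cs.length - i = k →
    pvGoR c i (cs.drop i) ((List.range' i (cs.length - i)).map g) =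
      ((List.range' i (cs.length - i)).map (fun j =>
        match pvScanR cs c j with
          | some rr => min (g j) ((rr : Int) - j)
          | none => g j),
       pvScanR cs c i) := by
  intro k
  induction k with
  | zero =>
    intro i hk
    have h1 : cs.drop i = [] := List.drop_eq_nil_of_le (by omega)
    have h2 : pvScanR cs c i = none := by
      rw [pvScanR, if_neg (by omega)]
    simp [h1, hk, h2, pvGoR]
  | succ m ih =>
    intro i hk
    have hi : i < cs.length := by omega
    have hdrop : cs.drop i = cs[i] :: cs.drop (i + 1) := List.drop_eq_getElem_cons hi
    have hgd : cs.getD i ' ' = cs[i] := List.getD_eq_getElem cs ' ' hi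
    have hrange : List.range' i (cs.length - i) = i :: List.range' (i + 1) (cs.length - (i + 1)) := by
      have : cs.length - i = (cs.length - (i + 1)) + 1 := by omega
      rw [this, List.range'_succ]
    have hprev' : (if c.toList = [cs[i]] then some i else pvScanR cs c (i + 1)) = pvScanR cs c i := by
      rw [pvScanR_unfold cs c i hi, hgd]
    rw [hdrop, hrange, List.map_cons, List.map_cons]
    simp only [pvGoR, ih (i + 1) (by omega), hprev']

lemma mem_getD_of_mem (cs : List Char) (ch : Char) (h : ch ∈ cs) :
    ∃ j, j < cs.length ∧ cs.getD j ' ' = ch := by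
  obtain ⟨j, hj, hg⟩ := List.mem_iff_getElem.mp h
  exact ⟨j, hj, by rw [List.getD_eq_getElem cs ' ' hj, hg]⟩

-- ===== VERDICT (by name: the statement is the Claim_ definition above) =====
theorem shortestToChar_spec : Claim_equal_shortestToChar := by
  intro s c _ hpre
  unfold Spec_shortestToChar shortestToChar shortestToChar_alt
  set cs := s.toList with hcs
  have hgl := pvGoL_eq cs c (cs.length : Int) (cs.length) 0 none (by omega) (by simp [pvLeftOpt])
  simp only [List.drop_zero, Nat.sub_zero] at hgl
  have hgr := pvGoR_eq cs c
      (fun j => match pvScanL cs c j with | some p => (j : Int) - p | none => (cs.length : Int))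
      (cs.length) 0 (by omega)
  simp only [List.drop_zero, Nat.sub_zero] at hgr
  simp only [hgl, hgr, List.range_eq_range']
  apply List.map_congr_left
  intro j hj
  have hjlt : j < cs.length := by
    have := List.mem_range'.mp hj; omega
  by_cases hc : c.toList = [cs.getD j ' ']
  · have h1 : pvScanL cs c j = some j := by rw [pvScanL_unfold, if_pos hc]
    have h2 : pvScanR cs c j = some j := by rw [pvScanR_unfold cs c j hjlt, if_pos hc]
    simp [hc, h1, h2]
  · have h1 : pvScanL cs c j = pvLeftOpt cs c j := by rw [pvScanL_unfold, if_neg hc]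
    have h2 : pvScanR cs c j = pvScanR cs c (j + 1) := by rw [pvScanR_unfold cs c j hjlt, if_neg hc]
    simp only [if_neg hc, h1, h2]
    cases hl : pvLeftOpt cs c j with
    | some le =>
      cases hr : pvScanR cs c (j + 1) with
      | none => simp
      | some rr => simp
    | none =>
      cases hr : pvScanR cs c (j + 1) with
      | none =>
        -- no occurrence of c anywhere: contradicts Pre_
        exfalso
        rcases hpre with hnil | hm
        · rw [hcs] at hjlt
          simp [hnil] at hjlt
        · obtain ⟨ch, hmem, hch'⟩ := List.mem_map.mp hm
          have hch : c.toList = [ch] := hch'.symm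
          rw [← hcs] at hmem
          obtain ⟨k, hklt, hkg⟩ := mem_getD_of_mem cs ch hmem
          rw [← hkg] at hch
          rcases Nat.lt_trichotomy k j with h1 | h1 | h1
          · cases j with
            | zero => omega
            | succ j' =>
              simp only [pvLeftOpt] at hl
              exact pvScanL_none cs c j' hl k (by omega) hch
          · exact hc (h1 ▸ hch)
          · exact pvScanR_none cs c (cs.length - (j + 1)) (j + 1) rfl hr k (by omega) hklt hch
      | some rr =>
        have hlt : rr < cs.length := pvScanR_lt cs c (cs.length - (j + 1)) (j + 1) rr rfl hr
        simp only
        have hmin : min ((cs.length : Int)) ((rr : Int) - j) = (rr : Int) - j := by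
          apply min_eq_right; omega
        rw [hmin]
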